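-- pv_equiv track=rewrite | github.com/Takhirchik/TRPG-Dusaliev | prng/prng/main.py | formatter_par
-- ===== SOURCE A (Python) =====
-- def formatter_par(args : list):
--     l = []
--     k = 1
--     for arg in args:
--         if len(l) < k:
--             l.append(arg)
--         else:
--             if arg.isdigit():
--                 l[k - 1] += arg
--             else:
--                 k += 1
--                 continue
--     return l
-- ===== SOURCE B (Python) =====
-- def formatter_par(args : list):
--     res = []
--     i = 0
--     n = len(args)
--     while i < n:
--         slot = args[i]
--         i += 1
--         while i < n and args[i].isdigit():
--             slot += args[i]
--             i += 1
--         res.append(slot)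
--         if i < n:
--             i += 1  # skip exactly one separator
--     return res
-- ===== Notes on version B (the rewrite author's own statement) =====
-- stated objective: alternative
-- what changed: Replaces A's single fold that mutates a growing result list via a slot counter k (append / in-place concat / bump-k) with an explicit index sweep: start a slot, an inner while concatenates following digit strings, then skip exactly one separator.
import Mathlib
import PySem

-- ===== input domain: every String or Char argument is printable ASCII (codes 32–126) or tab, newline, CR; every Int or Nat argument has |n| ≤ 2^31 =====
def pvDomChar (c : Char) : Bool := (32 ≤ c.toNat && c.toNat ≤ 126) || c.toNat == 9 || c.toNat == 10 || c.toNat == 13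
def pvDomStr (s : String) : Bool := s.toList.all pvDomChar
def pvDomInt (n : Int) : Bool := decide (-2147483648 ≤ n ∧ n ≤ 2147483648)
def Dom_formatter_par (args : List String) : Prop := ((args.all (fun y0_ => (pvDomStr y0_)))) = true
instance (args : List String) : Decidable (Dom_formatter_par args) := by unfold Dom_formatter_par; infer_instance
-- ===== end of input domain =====

-- B replaces A's running append/concat-or-bump-counter fold by an explicit index sweep:
-- start a slot, inner loop concatenates following digit strings, then skip one separator.
-- Objective: alternative decomposition (same cost).

-- ===== PORT A =====
def pvStepA (s : List String × Nat) (arg : String) : List String × Nat :=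
  match s with
  | (l, k) =>
    if l.length < k then (l ++ [arg], k)
    else if PySem.Str.strIsdigit arg then (l.modify (k - 1) (· ++ arg), k)
    else (l, k + 1)

def formatter_par (args : List String) : List String :=
  (args.foldl pvStepA ([], 1)).1

-- ===== PORT B =====
-- inner while: while i < n and args[i].isdigit(): slot += args[i]; i += 1
def pvInner (slot : String) (rest : List String) : String × List String :=
  match rest with
  | [] => (slot, [])
  | a :: t => if PySem.Str.strIsdigit a then pvInner (slot ++ a) t else (slot, a :: t)

-- termination fact for the outer loop (cited by decreasing_by)
theorem pvInner_len (slot : String) (rest : List String) :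
    (pvInner slot rest).2.length ≤ rest.length := by
  induction rest generalizing slot with
  | nil => simp [pvInner]
  | cons a t ih =>
    simp only [pvInner]
    split
    · exact le_trans (ih _) (Nat.le_succ _)
    · simp

-- outer while over index i, rendered as recursion on the remaining suffix
def formatter_par_alt (args : List String) : List String :=
  match args with
  | [] => []
  | a :: t =>
    match h : pvInner a t with
    | (s, r) =>
      match r with
      | [] => [s]
      | _ :: r' => s :: formatter_par_alt r'   -- if i < n: i += 1 (skip one separator)
termination_by args.length
decreasing_by
  have hle := pvInner_len a t
  rw [h] at hle
  simp at hle
  simp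
  omega

-- ===== PRECONDITION & SPEC =====
def Spec_formatter_par (args : List String) (out : List String) : Prop := out = formatter_par_alt args
instance (args : List String) (out : List String) : Decidable (Spec_formatter_par args out) := by unfold Spec_formatter_par; infer_instance

-- ===== CLAIM (what is proved, stated in full; the proofs are below) =====
def Claim_equal_formatter_par : Prop := ∀ (args : List String), Dom_formatter_par args → Spec_formatter_par args (formatter_par args)

-- ===== LEMMAS AND PROOFS =====

theorem alt_nil : formatter_par_alt [] = [] := by rw [formatter_par_alt]

theorem alt_cons (a : String) (t : List String) :
    formatter_par_alt (a :: t) =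
      (match pvInner a t with
        | (s, []) => [s]
        | (s, _ :: r') => s :: formatter_par_alt r') := by
  rw [formatter_par_alt]
  split
  next s r h =>
    cases r <;> simp [h]

theorem modify_app {α : Type} (l : List α) (s : α) (f : α → α) :
    (l ++ [s]).modify l.length f = l ++ [f s] := by
  induction l with
  | nil => simp [List.modify]
  | cons x xs ih => simpa [List.modify] using ih

-- joint invariant for A's fold: "open" state (current slot is last element) and
-- "closed" state (awaiting a fresh slot), by strong induction on the remaining suffix
theorem pv_main (n : Nat) :
    (∀ (rest : List String), rest.length ≤ n → ∀ (l : List String) (k : Nat) (slot : String),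
        l.length + 1 = k →
        (rest.foldl pvStepA (l ++ [slot], k)).1 =
          l ++ (match pvInner slot rest with
                | (s, []) => [s]
                | (s, _ :: r') => s :: formatter_par_alt r')) ∧
    (∀ (rest : List String), rest.length ≤ n → ∀ (l : List String) (k : Nat),
        l.length + 1 = k →
        (rest.foldl pvStepA (l, k)).1 = l ++ formatter_par_alt rest) := by
  induction n with
  | zero =>
    constructor
    · intro rest hlen l k slot hk
      have : rest = [] := List.eq_nil_of_length_eq_zero (Nat.le_zero.mp hlen)
      subst this
      simp [pvInner]
    · intro rest hlen l k hk
      have : rest = [] := List.eq_nil_of_length_eq_zero (Nat.le_zero.mp hlen)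
      subst this
      simp [alt_nil]
  | succ n ih =>
    constructor
    · intro rest hlen l k slot hk
      cases rest with
      | nil => simp [pvInner]
      | cons a t =>
        have ht : t.length ≤ n := by simpa using Nat.lt_succ_iff.mp (Nat.lt_of_lt_of_le (by simp) hlen)
        simp only [List.foldl_cons, pvStepA]
        have hnotlt : ¬ (l ++ [slot]).length < k := by simp; omega
        rw [if_neg hnotlt]
        by_cases hd : PySem.Str.strIsdigit a
        · have hd2 : PySem.Chars.strIsdigit a.toList = true := by simpa using hd
          rw [if_pos hd]
          have hm : (l ++ [slot]).modify (k - 1) (· ++ a) = l ++ [slot ++ a] := by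
            have : k - 1 = l.length := by omega
            rw [this, modify_app]
          rw [hm, ih.1 t ht l k (slot ++ a) hk]
          simp [pvInner, hd2]
        · have hd2 : PySem.Chars.strIsdigit a.toList = false := by
            simpa using (Bool.not_eq_true _).mp (by simpa using hd)
          rw [if_neg hd]
          have hk' : (l ++ [slot]).length + 1 = k + 1 := by simp; omega
          rw [ih.2 t ht (l ++ [slot]) (k + 1) hk']
          simp [pvInner, hd2]
    · intro rest hlen l k hk
      cases rest with
      | nil => simp [alt_nil]
      | cons a t =>
        have ht : t.length ≤ n := by simpa using Nat.lt_succ_iff.mp (Nat.lt_of_lt_of_le (by simp) hlen)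
        simp only [List.foldl_cons, pvStepA]
        have hlt : l.length < k := by omega
        rw [if_pos hlt, ih.1 t ht l k a hk, alt_cons]

-- ===== VERDICT (by name: the statement is the Claim_ definition above) =====
theorem formatter_par_spec : Claim_equal_formatter_par := by
  intro args _
  unfold Spec_formatter_par formatter_par
  simpa using (pv_main args.length).2 args (Nat.le_refl _) [] 1 rfl
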